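-- pv_equiv track=rewrite | github.com/kvyatkovsky57/Dominoes | Dominoes/task/dominoes/dominoes.py | computer_choose_piece
-- ===== SOURCE A (Python) =====
-- def computer_choose_piece(computer_pieces, domino_snake, snake_tail):
--     count_dict = {}
--     for i in range(0, 7):
--         count_dict[i] = 0
--
--     for piece in computer_pieces + domino_snake:
--         for x in piece:
--             count_dict[x] += 1
--
--     legal_piece_numbers = dict()
--
--     for piece in computer_pieces:
--         if snake_tail[0] in piece:
--             legal_piece_numbers[(computer_pieces.index(piece) + 1) * -1] = count_dict[piece[0]] + count_dict[piece[1]]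
--
--         elif snake_tail[1] in piece:
--             legal_piece_numbers[computer_pieces.index(piece) + 1] = count_dict[piece[0]] + count_dict[piece[1]]
--
--     piece_number = 0 if len(legal_piece_numbers) == 0 else max(legal_piece_numbers, key=legal_piece_numbers.get)
--     return piece_number
-- ===== SOURCE B (Python) =====
-- def computer_choose_piece(computer_pieces, domino_snake, snake_tail):
--     counts = [0] * 7
--     for piece in computer_pieces:
--         for x in piece:
--             counts[x] += 1
--     for piece in domino_snake:
--         for x in piece:
--             counts[x] += 1
--
--     best_number = 0
--     best_score = None
--     for idx, piece in enumerate(computer_pieces):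
--         if snake_tail[0] in piece:
--             number = -(idx + 1)
--         elif snake_tail[1] in piece:
--             number = idx + 1
--         else:
--             continue
--         score = counts[piece[0]] + counts[piece[1]]
--         if best_score is None or best_score < score:
--             best_number = number
--             best_score = score
--     return best_number
-- ===== Notes on version B (the rewrite author's own statement) =====
-- stated objective: simpler
-- what changed: B replaces A's dict of candidate numbers (keyed via repeated computer_pieces.index calls) plus a trailing max(..., key=dict.get) pass by a single running-best pass over enumerate(computer_pieces), and A's range(0,7) count dict by a plain 7-slot count list.
import Mathlib
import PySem

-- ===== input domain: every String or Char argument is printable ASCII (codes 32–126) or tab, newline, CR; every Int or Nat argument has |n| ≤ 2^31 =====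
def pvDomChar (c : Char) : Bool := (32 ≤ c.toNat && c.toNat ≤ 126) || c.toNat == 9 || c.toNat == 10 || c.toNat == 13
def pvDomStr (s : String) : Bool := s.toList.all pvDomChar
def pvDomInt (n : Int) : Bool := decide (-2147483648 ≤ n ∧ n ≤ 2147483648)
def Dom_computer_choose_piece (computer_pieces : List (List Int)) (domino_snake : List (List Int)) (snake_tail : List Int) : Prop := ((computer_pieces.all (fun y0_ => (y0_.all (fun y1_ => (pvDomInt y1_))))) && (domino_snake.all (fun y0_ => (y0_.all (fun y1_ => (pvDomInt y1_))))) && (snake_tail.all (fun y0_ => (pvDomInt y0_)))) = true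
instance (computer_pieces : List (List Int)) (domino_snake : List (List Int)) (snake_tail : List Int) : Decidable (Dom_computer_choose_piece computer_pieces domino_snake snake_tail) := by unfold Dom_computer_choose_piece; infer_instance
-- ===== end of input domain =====

-- B replaces A's dict-of-candidates + trailing max(…, key=…) pass (which calls list.index inside the
-- loop) by one running-best pass over enumerate(computer_pieces), with a plain 7-slot count list.

-- ===== PORT A =====
def computer_choose_piece (computer_pieces : List (List Int)) (domino_snake : List (List Int)) (snake_tail : List Int) : Int :=
  -- count_dict = {i: 0 for i in range(0, 7)} (built by the first loop)
  let count0 : PySem.Dict Int Int :=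
    (PySem.List.pyRange 0 7 1).foldl (fun d i => d.insert i 0) PySem.Dict.empty
  -- for piece in computer_pieces + domino_snake: for x in piece: count_dict[x] += 1
  let count_dict : PySem.Dict Int Int :=
    (computer_pieces ++ domino_snake).foldl
      (fun d piece => piece.foldl (fun d x => d.modify x 0 (· + 1)) d) count0
  -- for piece in computer_pieces: fill legal_piece_numbers (snake_tail[i]/piece[i] via pyGetD; A raises outside Pre_)
  let legal : PySem.Dict Int Int :=
    computer_pieces.foldl (fun d piece =>
      if PySem.List.pyGetD snake_tail 0 0 ∈ piece then
        d.insert ((((PySem.List.index? computer_pieces piece).getD 0 : Int) + 1) * (-1))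
          (count_dict.getD (PySem.List.pyGetD piece 0 0) 0 + count_dict.getD (PySem.List.pyGetD piece 1 0) 0)
      else if PySem.List.pyGetD snake_tail 1 0 ∈ piece then
        d.insert (((PySem.List.index? computer_pieces piece).getD 0 : Int) + 1)
          (count_dict.getD (PySem.List.pyGetD piece 0 0) 0 + count_dict.getD (PySem.List.pyGetD piece 1 0) 0)
      else d) PySem.Dict.empty
  -- piece_number = 0 if len(legal) == 0 else max(legal, key=legal.get)
  if legal.size = 0 then 0
  else (PySem.List.max? legal.keys (fun k => legal.getD k 0)).getD 0

-- ===== PORT B =====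
-- 'if best_score is None or best_score < score: take (number, score)' of Source B
def pvBstep (st : Int × Option Int) (number : Int) (score : Int) : Int × Option Int :=
  match st.2 with
  | none => (number, some score)
  | some b => if b < score then (number, some score) else st

def computer_choose_piece_alt (computer_pieces : List (List Int)) (domino_snake : List (List Int)) (snake_tail : List Int) : Int :=
  -- counts = [0] * 7; two counting loops
  let counts0 : List Int := List.replicate 7 0
  let counts1 : List Int := computer_pieces.foldl
    (fun c piece => piece.foldl (fun c x => PySem.List.pySetD c x (PySem.List.pyGetD c x 0 + 1)) c) counts0
  let counts : List Int := domino_snake.foldl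
    (fun c piece => piece.foldl (fun c x => PySem.List.pySetD c x (PySem.List.pyGetD c x 0 + 1)) c) counts1
  -- single pass over enumerate(computer_pieces) keeping (best_number, best_score)
  let final : Int × Option Int := (PySem.List.enumerate computer_pieces 0).foldl
    (fun s ip =>
      if PySem.List.pyGetD snake_tail 0 0 ∈ ip.2 then
        pvBstep s (-(ip.1 + 1))
          (PySem.List.pyGetD counts (PySem.List.pyGetD ip.2 0 0) 0 + PySem.List.pyGetD counts (PySem.List.pyGetD ip.2 1 0) 0)
      else if PySem.List.pyGetD snake_tail 1 0 ∈ ip.2 then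
        pvBstep s (ip.1 + 1)
          (PySem.List.pyGetD counts (PySem.List.pyGetD ip.2 0 0) 0 + PySem.List.pyGetD counts (PySem.List.pyGetD ip.2 1 0) 0)
      else s) (0, none)
  final.1

-- ===== PRECONDITION & SPEC =====
-- Pre_ is exactly where A returns: every number on a piece lies in 0..6 (else KeyError in the counting
-- loop) and the snake_tail/piece indexing of the legality loop stays in range (else IndexError).
def Pre_computer_choose_piece (computer_pieces : List (List Int)) (domino_snake : List (List Int)) (snake_tail : List Int) : Prop :=
  (∀ p ∈ computer_pieces ++ domino_snake, ∀ x ∈ p, 0 ≤ x ∧ x ≤ 6) ∧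
  (snake_tail = [] → computer_pieces = []) ∧
  (snake_tail.length = 1 → ∀ p ∈ computer_pieces, PySem.List.pyGetD snake_tail 0 0 ∈ p ∧ 2 ≤ p.length) ∧
  (2 ≤ snake_tail.length → ∀ p ∈ computer_pieces,
    (PySem.List.pyGetD snake_tail 0 0 ∈ p ∨ PySem.List.pyGetD snake_tail 1 0 ∈ p) → 2 ≤ p.length)
instance (computer_pieces : List (List Int)) (domino_snake : List (List Int)) (snake_tail : List Int) : Decidable (Pre_computer_choose_piece computer_pieces domino_snake snake_tail) := by unfold Pre_computer_choose_piece; infer_instance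
def pvWitness_computer_choose_piece : List (List Int) × List (List Int) × List Int := ([[1, 2], [3, 4]], [[2, 3]], [4, 1])
def Spec_computer_choose_piece (computer_pieces : List (List Int)) (domino_snake : List (List Int)) (snake_tail : List Int) (out : Int) : Prop := out = computer_choose_piece_alt computer_pieces domino_snake snake_tail
instance (computer_pieces : List (List Int)) (domino_snake : List (List Int)) (snake_tail : List Int) (out : Int) : Decidable (Spec_computer_choose_piece computer_pieces domino_snake snake_tail out) := by unfold Spec_computer_choose_piece; infer_instance

-- ===== CLAIM (what is proved, stated in full; the proofs are below) =====
def Claim_equal_computer_choose_piece : Prop := ∀ (computer_pieces : List (List Int)) (domino_snake : List (List Int)) (snake_tail : List Int), Dom_computer_choose_piece computer_pieces domino_snake snake_tail → Pre_computer_choose_piece computer_pieces domino_snake snake_tail → Spec_computer_choose_piece computer_pieces domino_snake snake_tail (computer_choose_piece computer_pieces domino_snake snake_tail)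

-- ===== LEMMAS AND PROOFS =====

-- B's running best over an items list, starting from (0, None)
def pvBest (l : List (Int × Int)) : Int × Option Int :=
  l.foldl (fun s p => pvBstep s p.1 p.2) (0, none)

-- overwriting an assoc list at a key no pair carries is the identity
theorem pv_overwrite_id (k : Int) (v : Int) (t : List (Int × Int)) (h : ∀ p ∈ t, p.1 ≠ k) :
    t.map (fun p => if p.1 == k then (k, v) else p) = t := by
  induction t with
  | nil => rfl
  | cons q t ih =>
    have hq : (q.1 == k) = false := beq_eq_false_iff_ne.mpr (h q (by simp))
    rw [List.map_cons, ih (fun p hp => h p (List.mem_cons_of_mem _ hp)), hq]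
    simp

-- inserting a binding the dict already has is a no-op
theorem pv_insert_self (d : PySem.Dict Int Int) (k v : Int) (hn : d.keys.Nodup)
    (h : d.get? k = some v) : d.insert k v = d := by
  have hc : d.contains k = true := by
    rw [PySem.Dict.contains_iff_mem_keys]
    by_contra hk
    rw [← PySem.Dict.get?_eq_none_iff_not_mem_keys] at hk
    simp [hk] at h
  apply PySem.Dict.ext
  simp only [PySem.Dict.insert, hc, if_pos]
  -- the unique pair whose key is k is exactly (k, v)
  have hmem : (k, v) ∈ d.items := PySem.Dict.mem_items_of_get?_eq_some d h
  obtain ⟨l1, l2, hsplit⟩ := List.mem_iff_append.mp hmem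
  have hkeys : (d.items.map (·.1)).Nodup := hn
  rw [hsplit] at hkeys ⊢
  simp only [List.map_append, List.map_cons] at hkeys
  obtain ⟨hn1, hn2, hdisj⟩ := List.nodup_append.mp hkeys
  have h1 : ∀ p ∈ l1, p.1 ≠ k := by
    intro p hp hpk
    have hk1 : k ∈ l1.map (·.1) := by simpa [hpk] using List.mem_map_of_mem (f := (·.1)) hp
    exact hdisj k hk1 k (List.mem_cons_self ..) rfl
  have h2 : ∀ p ∈ l2, p.1 ≠ k := by
    intro p hp hpk
    exact (List.nodup_cons.mp hn2).1 (by simpa [hpk] using List.mem_map_of_mem (f := (·.1)) hp)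
  rw [List.map_append, List.map_cons]
  rw [pv_overwrite_id k v l1 h1, pv_overwrite_id k v l2 h2]
  simp

-- the second component of the running best is the running max of the scores
theorem pv_best_snd (l : List (Int × Int)) (k b : Int) :
    (l.foldl (fun s p => pvBstep s p.1 p.2) (k, some b)).2
      = some (l.foldl (fun a p => max a p.2) b) := by
  induction l generalizing k b with
  | nil => rfl
  | cons q t ih =>
    simp only [List.foldl_cons]
    by_cases hb : b < q.2
    · rw [show pvBstep (k, some b) q.1 q.2 = (q.1, some q.2) by simp [pvBstep, hb]]
      rw [ih, show max b q.2 = q.2 by omega]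
    · rw [show pvBstep (k, some b) q.1 q.2 = (k, some b) by simp [pvBstep, hb]]
      rw [ih, show max b q.2 = b by omega]

-- one step of Python max's fold, written on max? itself
theorem pv_max?_cons2 (key : Int → Int) (a b : Int) (ks : List Int) :
    PySem.List.max? (a :: b :: ks) key
      = PySem.List.max? ((if key a < key b then b else a) :: ks) key := by
  by_cases h : key a < key b <;> simp [PySem.List.max?, h]

-- A's max(keys, key=get) computes the key of B's running best
theorem pv_maxfold_eq_best (key : Int → Int) (l : List (Int × Int)) (bk bv : Int)
    (hl : ∀ p ∈ l, key p.1 = p.2) (hk : key bk = bv) :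
    (PySem.List.max? (bk :: l.map (·.1)) key
      = some ((l.foldl (fun s p => pvBstep s p.1 p.2) (bk, some bv)).1))
    ∧ (l.foldl (fun s p => pvBstep s p.1 p.2) (bk, some bv)).2
        = some (key ((l.foldl (fun s p => pvBstep s p.1 p.2) (bk, some bv)).1)) := by
  induction l generalizing bk bv with
  | nil => exact ⟨by simp [PySem.List.max?], by simpa using hk.symm⟩
  | cons q t ih =>
    have hq : key q.1 = q.2 := hl q (by simp)
    have ht : ∀ p ∈ t, key p.1 = p.2 := fun p hp => hl p (by simp [hp])
    simp only [List.map_cons, List.foldl_cons]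
    rw [pv_max?_cons2]
    by_cases hlt : bv < q.2
    · have e1 : (if key bk < key q.1 then q.1 else bk) = q.1 := by rw [hq, hk]; simp [hlt]
      have e2 : pvBstep (bk, some bv) q.1 q.2 = (q.1, some q.2) := by simp [pvBstep, hlt]
      rw [e1, e2]
      exact ih q.1 q.2 ht hq
    · have e1 : (if key bk < key q.1 then q.1 else bk) = bk := by rw [hq, hk]; simp [hlt]
      have e2 : pvBstep (bk, some bv) q.1 q.2 = (bk, some bv) := by simp [pvBstep, hlt]
      rw [e1, e2]
      exact ih bk bv ht hk

-- A's final 'max by value, first wins' over a nodup-key dict returns B's running best number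
theorem pv_answer_eq (d : PySem.Dict Int Int) (hn : d.keys.Nodup) :
    (if d.size = 0 then (0 : Int)
     else (PySem.List.max? d.keys (fun k => d.getD k 0)).getD 0) = (pvBest d.items).1 := by
  have hval : ∀ p ∈ d.items, d.getD p.1 0 = p.2 := by
    intro p hp
    exact PySem.Dict.getD_of_mem_items d (k := p.1) (v := p.2) (by simpa using hp) hn 0
  rcases hitems : d.items with _ | ⟨q, t⟩
  · simp [PySem.Dict.size, hitems, pvBest]
  · have hsz : d.size ≠ 0 := by simp [PySem.Dict.size, hitems]
    rw [if_neg hsz]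
    have hkeys : d.keys = q.1 :: t.map (·.1) := by simp [PySem.Dict.keys, hitems]
    have hq : d.getD q.1 0 = q.2 := hval q (by simp [hitems])
    have ht : ∀ p ∈ t, d.getD p.1 0 = p.2 := fun p hp => hval p (by simp [hitems, hp])
    have hb : pvBest (q :: t) = t.foldl (fun s p => pvBstep s p.1 p.2) (q.1, some q.2) := by
      simp [pvBest, pvBstep]
    obtain ⟨h1, -⟩ := pv_maxfold_eq_best (fun k => d.getD k 0) t q.1 q.2 ht hq
    rw [hb, hkeys]
    exact (congrArg (fun o => o.getD 0) h1).trans Option.getD_some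

theorem pv_length_setstep (c : List Int) (x : Int) :
    (PySem.List.pySetD c x (PySem.List.pyGetD c x 0 + 1)).length = c.length := by
  unfold PySem.List.pySetD PySem.List.pySet?
  cases h : PySem.List.pyIdx? c.length x <;> simp

-- counting loop over a 7-slot list (B) counts occurrences, for in-range updates
theorem pv_list_count (l : List Int) :
    ∀ (c : List Int), (∀ x ∈ l, 0 ≤ x ∧ x < (c.length : Int)) → ∀ (v : Int), 0 ≤ v →
    PySem.List.pyGetD
        (l.foldl (fun c x => PySem.List.pySetD c x (PySem.List.pyGetD c x 0 + 1)) c) v 0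
      = PySem.List.pyGetD c v 0 + (l.count v : Int) := by
  induction l with
  | nil => intro c _ v _; simp
  | cons x l ih =>
    intro c hl v hv
    obtain ⟨hx0, hxlen⟩ := hl x (by simp)
    have hstep : ∀ w : Int, 0 ≤ w →
        PySem.List.pyGetD (PySem.List.pySetD c x (PySem.List.pyGetD c x 0 + 1)) w 0
          = PySem.List.pyGetD c w 0 + (if x = w then (1 : Int) else 0) := by
      intro w hw
      have hidx : PySem.List.pyIdx? c.length x = some x.toNat := by
        unfold PySem.List.pyIdx?
        rw [if_pos hx0, if_pos hxlen]
      unfold PySem.List.pySetD PySem.List.pySet?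
      rw [hidx]
      simp only [Option.map_some, Option.getD_some]
      by_cases hvw : w < (c.length : Int)
      · have hwidx : PySem.List.pyIdx? c.length w = some w.toNat := by
          unfold PySem.List.pyIdx?
          rw [if_pos hw, if_pos hvw]
        unfold PySem.List.pyGetD PySem.List.pyGet?
        rw [hidx]
        simp only [List.length_set, hwidx, Option.bind_some]
        have hxl : x.toNat < c.length := by omega
        have hwl : w.toNat < c.length := by omega
        rw [List.getElem?_eq_getElem (by simpa using hwl), List.getElem?_eq_getElem hwl]
        rw [List.getElem?_eq_getElem hxl]
        by_cases hxw : x = w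
        · subst hxw
          simp [List.getElem_set_self]
        · have : x.toNat ≠ w.toNat := by omega
          simp [List.getElem_set_ne this, hxw]
      · have hxw : x ≠ w := by omega
        unfold PySem.List.pyGetD PySem.List.pyGet?
        have hwidx : PySem.List.pyIdx? c.length w = none := by
          unfold PySem.List.pyIdx?
          rw [if_pos hw, if_neg hvw]
        rw [hidx]
        simp only [List.length_set, hwidx, Option.bind_none]
        simp [hxw]
    simp only [List.foldl_cons]
    rw [ih _ (by intro y hy; have := hl y (by simp [hy]); rwa [pv_length_setstep] ) v hv]
    rw [hstep v hv, List.count_cons]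
    by_cases hxv : x = v
    · simp [hxv]
      omega
    · simp [hxv]

-- the initial range(0,7) dict of A is identically zero
theorem pv_count0_getD (x : Int) :
    ((PySem.List.pyRange 0 7 1).foldl (fun d i => d.insert i 0)
      (PySem.Dict.empty : PySem.Dict Int Int)).getD x 0 = 0 := by
  have hr : PySem.List.pyRange 0 7 1 = [0, 1, 2, 3, 4, 5, 6] := by decide
  rw [hr]
  simp only [List.foldl_cons, List.foldl_nil, PySem.Dict.getD_insert]
  split_ifs <;> simp [PySem.Dict.getD_empty]

-- pvBstep does not move when the candidate does not beat the current best
theorem pv_bstep_no_update (st : Int × Option Int) (k2 v b : Int) (h2 : st.2 = some b)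
    (hvb : v ≤ b) : pvBstep st k2 v = st := by
  rcases st with ⟨a, o⟩
  cases o with
  | none => simp at h2
  | some b' =>
    have hb : b' = b := by simpa using h2
    simp [pvBstep, show ¬ b' < v by omega]

-- the running best's score bounds every stored score
theorem pv_best_bound (q : Int × Int) (t : List (Int × Int)) :
    ∃ b, (pvBest (q :: t)).2 = some b ∧ ∀ p ∈ q :: t, p.2 ≤ b := by
  refine ⟨t.foldl (fun a p => max a p.2) q.2, ?_, ?_⟩
  · show (List.foldl (fun s p => pvBstep s p.1 p.2) (pvBstep (0, none) q.1 q.2) t).2 = _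
    rw [show pvBstep (0, none) q.1 q.2 = (q.1, some q.2) from rfl]
    exact pv_best_snd t q.1 q.2
  · intro p hp
    rcases List.mem_cons.mp hp with h | h
    · rw [h]
      exact (PySem.List.le_foldl_max_int t (·.2) q.2).1
    · exact (PySem.List.le_foldl_max_int t (·.2) q.2).2 p h

-- re-offering an already stored score never updates the running best
theorem pv_stale_bstep (d : PySem.Dict Int Int) (k v : Int) (h : d.get? k = some v)
    (k2 : Int) : pvBstep (pvBest d.items) k2 v = pvBest d.items := by
  have hmem : (k, v) ∈ d.items := PySem.Dict.mem_items_of_get?_eq_some d h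
  rcases hit : d.items with _ | ⟨q, t⟩
  · rw [hit] at hmem; simp at hmem
  · obtain ⟨b, h2, hall⟩ := pv_best_bound q t
    exact pv_bstep_no_update _ k2 v b h2 (hall (k, v) (hit ▸ hmem))

-- inserting under a key absent from the dict appends the pair
theorem pv_fresh_items (d : PySem.Dict Int Int) (k v : Int) (hfresh : k ∉ d.keys) :
    (d.insert k v).items = d.items ++ [(k, v)] := by
  have hc : d.contains k = false := by
    rw [← Bool.not_eq_true, PySem.Dict.contains_iff_mem_keys]
    exact hfresh
  simp [PySem.Dict.insert, hc]

-- one fresh legal insert, packaged with all re-established invariants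
theorem pv_fresh_step (d : PySem.Dict Int Int) (s : Int × Option Int) (k v : Int) (n : Nat)
    (hs : s = pvBest d.items) (hn : d.keys.Nodup) (hbound : ∀ k' ∈ d.keys, k'.natAbs ≤ n)
    (hk : k.natAbs = n + 1) :
    pvBstep s k v = pvBest (d.insert k v).items ∧ (d.insert k v).keys.Nodup ∧
    (∀ k' ∈ (d.insert k v).keys, k'.natAbs ≤ n + 1) ∧
    (d.insert k v).get? k = some v ∧
    (∀ k', k'.natAbs ≤ n → (d.insert k v).get? k' = d.get? k') := by
  have hfresh : k ∉ d.keys := fun hmem => by have := hbound k hmem; omega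
  have hitems := pv_fresh_items d k v hfresh
  refine ⟨?_, PySem.Dict.nodup_keys_insert _ _ _ hn, ?_, ?_, ?_⟩
  · rw [hs, hitems]
    simp [pvBest, List.foldl_append]
  · intro k' hk'
    rcases (PySem.Dict.mem_keys_insert _ _ _ _).mp hk' with h | h
    · omega
    · have := hbound k' h; omega
  · rw [PySem.Dict.get?_insert, if_pos rfl]
  · intro k' hk'
    rw [PySem.Dict.get?_insert, if_neg (by omega)]

-- a key carrying a stored value is one of the dict's keys
theorem pv_mem_keys_of_get? (d : PySem.Dict Int Int) (k v : Int) (h : d.get? k = some v) :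
    k ∈ d.keys := by
  by_contra hnm
  rw [← PySem.Dict.get?_eq_none_iff_not_mem_keys] at hnm
  rw [h] at hnm
  cases hnm

-- the master loop invariant: A's legality/dict loop vs B's enumerate/running-best loop
theorem pv_master (cp : List (List Int)) (t0 t1 : Int) (scA scB : List Int → Int)
    (hsc : ∀ p ∈ cp, scA p = scB p) :
    ∀ (suf pre : List (List Int)) (d : PySem.Dict Int Int) (s : Int × Option Int),
    cp = pre ++ suf →
    s = pvBest d.items →
    d.keys.Nodup →
    (∀ k ∈ d.keys, k.natAbs ≤ pre.length) →
    (∀ q ∈ pre,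
      (t0 ∈ q → d.get? ((((PySem.List.index? cp q).getD 0 : Int) + 1) * (-1)) = some (scA q)) ∧
      (t0 ∉ q → t1 ∈ q → d.get? (((PySem.List.index? cp q).getD 0 : Int) + 1) = some (scA q))) →
    ((PySem.List.enumerate suf (pre.length : Int)).foldl (fun s ip =>
        if t0 ∈ ip.2 then pvBstep s (-(ip.1 + 1)) (scB ip.2)
        else if t1 ∈ ip.2 then pvBstep s (ip.1 + 1) (scB ip.2)
        else s) s
      = pvBest (suf.foldl (fun d piece =>
          if t0 ∈ piece then
            d.insert ((((PySem.List.index? cp piece).getD 0 : Int) + 1) * (-1)) (scA piece)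
          else if t1 ∈ piece then
            d.insert (((PySem.List.index? cp piece).getD 0 : Int) + 1) (scA piece)
          else d) d).items)
    ∧ (suf.foldl (fun d piece =>
          if t0 ∈ piece then
            d.insert ((((PySem.List.index? cp piece).getD 0 : Int) + 1) * (-1)) (scA piece)
          else if t1 ∈ piece then
            d.insert (((PySem.List.index? cp piece).getD 0 : Int) + 1) (scA piece)
          else d) d).keys.Nodup := by
  intro suf
  induction suf with
  | nil =>
    intro pre d s hcp hs hn hbound hinv
    exact ⟨by simpa [PySem.List.enumerate] using hs, by simpa using hn⟩
  | cons p rest ih =>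
    intro pre d s hcp hs hn hbound hinv
    have hpcp : p ∈ cp := by rw [hcp]; simp
    have hscp : scB p = scA p := (hsc p hpcp).symm
    rw [PySem.List.enumerate_cons, List.foldl_cons, List.foldl_cons]
    simp only []
    have hcp' : cp = (pre ++ [p]) ++ rest := by rw [hcp]; simp
    by_cases ht0 : t0 ∈ p
    · rw [if_pos ht0, if_pos ht0]
      by_cases hpre : p ∈ pre
      · -- p already occurred: A's insert is a no-op, B's candidate cannot beat the best
        have hget := (hinv p hpre).1 ht0
        rw [pv_insert_self _ _ _ hn hget]
        rw [hs, hscp, pv_stale_bstep d _ _ hget _, ← hs]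
        have hres := ih (pre ++ [p]) d s hcp' hs hn
          (by intro k hk; have := hbound k hk; simp only [List.length_append,
              List.length_cons, List.length_nil]; omega)
          (by intro q hq
              rcases List.mem_append.mp hq with h | h
              · exact hinv q h
              · have : q = p := by simpa using h
                subst this
                exact hinv q hpre)
        simpa using hres
      · -- first occurrence: fresh key of magnitude pre.length + 1
        have hnotm : p ∉ pre := hpre
        have hidx : PySem.List.index? cp p = some pre.length := by
          rw [hcp]
          exact (PySem.List.index?_eq_some_iff _ _ _).mpr ⟨pre, rest, rfl, rfl, hnotm⟩
        rw [hidx]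
        have hkeyeq : (((pre.length : Nat) : Int) + 1) * (-1) = -((pre.length : Int) + 1) := by
          ring
        rw [show ((some pre.length).getD 0 : Nat) = pre.length from rfl, hkeyeq]
        obtain ⟨hb1, hb2, hb3, hb4, hb5⟩ :=
          pv_fresh_step d s (-((pre.length : Int) + 1)) (scA p) pre.length hs hn hbound (by omega)
        rw [hscp, hb1]
        have hres := ih (pre ++ [p]) _ _ hcp' rfl hb2
          (by intro k hk; have := hb3 k hk; simp only [List.length_append,
              List.length_cons, List.length_nil]; omega)
          (by intro q hq
              rcases List.mem_append.mp hq with h | h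
              · obtain ⟨c1, c2⟩ := hinv q h
                constructor
                · intro hqt0
                  have hg := c1 hqt0
                  rw [hb5 _ (by have := hbound _ (pv_mem_keys_of_get? d _ _ hg); omega)]
                  exact hg
                · intro hqn0 hqt1
                  have hg := c2 hqn0 hqt1
                  rw [hb5 _ (by have := hbound _ (pv_mem_keys_of_get? d _ _ hg); omega)]
                  exact hg
              · have : q = p := by simpa using h
                subst this
                refine ⟨fun _ => ?_, fun hqn0 _ => absurd ht0 hqn0⟩
                rw [hidx]
                rw [show ((some pre.length).getD 0 : Nat) = pre.length from rfl, hkeyeq]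
                exact hb4)
        simpa using hres
    · rw [if_neg ht0, if_neg ht0]
      by_cases ht1 : t1 ∈ p
      · rw [if_pos ht1, if_pos ht1]
        by_cases hpre : p ∈ pre
        · have hget := (hinv p hpre).2 ht0 ht1
          rw [pv_insert_self _ _ _ hn hget]
          rw [hs, hscp, pv_stale_bstep d _ _ hget _, ← hs]
          have hres := ih (pre ++ [p]) d s hcp' hs hn
            (by intro k hk; have := hbound k hk; simp only [List.length_append,
                List.length_cons, List.length_nil]; omega)
            (by intro q hq
                rcases List.mem_append.mp hq with h | h
                · exact hinv q h
                · have : q = p := by simpa using h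
                  subst this
                  exact hinv q hpre)
          simpa using hres
        · have hnotm : p ∉ pre := hpre
          have hidx : PySem.List.index? cp p = some pre.length := by
            rw [hcp]
            exact (PySem.List.index?_eq_some_iff _ _ _).mpr ⟨pre, rest, rfl, rfl, hnotm⟩
          rw [hidx]
          rw [show ((some pre.length).getD 0 : Nat) = pre.length from rfl]
          obtain ⟨hb1, hb2, hb3, hb4, hb5⟩ :=
            pv_fresh_step d s (((pre.length : Nat) : Int) + 1) (scA p) pre.length hs hn hbound
              (by omega)
          rw [hscp, hb1]
          have hres := ih (pre ++ [p]) _ _ hcp' rfl hb2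
            (by intro k hk; have := hb3 k hk; simp only [List.length_append,
                List.length_cons, List.length_nil]; omega)
            (by intro q hq
                rcases List.mem_append.mp hq with h | h
                · obtain ⟨c1, c2⟩ := hinv q h
                  constructor
                  · intro hqt0
                    have hg := c1 hqt0
                    rw [hb5 _ (by have := hbound _ (pv_mem_keys_of_get? d _ _ hg); omega)]
                    exact hg
                  · intro hqn0 hqt1
                    have hg := c2 hqn0 hqt1
                    rw [hb5 _ (by have := hbound _ (pv_mem_keys_of_get? d _ _ hg); omega)]
                    exact hg
                · have : q = p := by simpa using h
                  subst this
                  refine ⟨fun hqt0 => absurd hqt0 ht0, fun _ _ => ?_⟩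
                  rw [hidx]
                  rw [show ((some pre.length).getD 0 : Nat) = pre.length from rfl]
                  exact hb4)
          simpa using hres
      · rw [if_neg ht1, if_neg ht1]
        have hres := ih (pre ++ [p]) d s hcp' hs hn
          (by intro k hk; have := hbound k hk; simp only [List.length_append,
              List.length_cons, List.length_nil]; omega)
          (by intro q hq
              rcases List.mem_append.mp hq with h | h
              · exact hinv q h
              · have : q = p := by simpa using h
                subst this
                exact ⟨fun hqt0 => absurd hqt0 ht0, fun _ hqt1 => absurd hqt1 ht1⟩)
        simpa using hres

-- ===== VERDICT (by name: the statement is the Claim_ definition above) =====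
theorem computer_choose_piece_spec : Claim_equal_computer_choose_piece := by
  intro cp ds st hdom hpre
  obtain ⟨hrange, -, -, -⟩ := hpre
  unfold Spec_computer_choose_piece
  simp only [computer_choose_piece, computer_choose_piece_alt]
  -- A's count dict counts occurrences over all pieces
  have hA : ∀ x : Int,
      ((cp ++ ds).foldl (fun d piece => piece.foldl (fun d x => d.modify x 0 (· + 1)) d)
        ((PySem.List.pyRange 0 7 1).foldl (fun d i => d.insert i 0) PySem.Dict.empty)).getD x 0
      = ((cp ++ ds).flatten.count x : Int) := by
    intro x
    rw [← List.foldl_flatten, PySem.Dict.getD_foldl_modify_add_one, pv_count0_getD]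
    simp
  -- B's count list counts occurrences over all pieces, at nonnegative indices
  have hc0 : ∀ v : Int, 0 ≤ v → PySem.List.pyGetD (List.replicate 7 (0 : Int)) v 0 = 0 := by
    intro v hv
    unfold PySem.List.pyGetD PySem.List.pyGet?
    rcases hk : PySem.List.pyIdx? (List.replicate 7 (0 : Int)).length v with _ | k
    · simp
    · by_cases hk7 : k < 7
      · simp [hk7]
        interval_cases k <;> rfl
      · simp [hk7]
  have hflat : ∀ x ∈ (cp ++ ds).flatten, 0 ≤ x ∧ x < ((List.replicate 7 (0 : Int)).length : Int) := by
    intro x hx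
    obtain ⟨p, hp, hxp⟩ := List.mem_flatten.mp hx
    have := hrange p hp x hxp
    simp only [List.length_replicate]
    omega
  have hB : ∀ v : Int, 0 ≤ v →
      PySem.List.pyGetD
        (ds.foldl (fun c piece => piece.foldl
            (fun c x => PySem.List.pySetD c x (PySem.List.pyGetD c x 0 + 1)) c)
          (cp.foldl (fun c piece => piece.foldl
            (fun c x => PySem.List.pySetD c x (PySem.List.pyGetD c x 0 + 1)) c)
            (List.replicate 7 0))) v 0
      = ((cp ++ ds).flatten.count v : Int) := by
    intro v hv
    rw [← List.foldl_append, ← List.foldl_flatten, pv_list_count _ _ hflat v hv, hc0 v hv]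
    simp
  -- a Python-indexed element of an admitted piece is nonnegative
  have harg : ∀ p ∈ cp ++ ds, ∀ i : Int, 0 ≤ PySem.List.pyGetD p i 0 := by
    intro p hp i
    unfold PySem.List.pyGetD PySem.List.pyGet?
    rcases hk : PySem.List.pyIdx? p.length i with _ | k
    · simp
    · simp only [Option.bind_some]
      rcases hg : p[k]? with _ | a
      · simp
      · have ha : a ∈ p := List.mem_of_getElem? hg
        simpa using (hrange p hp a ha).1
  -- the two score functions agree on every piece of the hand
  have hsc : ∀ p ∈ cp,
      (((cp ++ ds).foldl (fun d piece => piece.foldl (fun d x => d.modify x 0 (· + 1)) d)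
          ((PySem.List.pyRange 0 7 1).foldl (fun d i => d.insert i 0) PySem.Dict.empty)).getD
            (PySem.List.pyGetD p 0 0) 0
        + ((cp ++ ds).foldl (fun d piece => piece.foldl (fun d x => d.modify x 0 (· + 1)) d)
          ((PySem.List.pyRange 0 7 1).foldl (fun d i => d.insert i 0) PySem.Dict.empty)).getD
            (PySem.List.pyGetD p 1 0) 0)
      = (PySem.List.pyGetD
          (ds.foldl (fun c piece => piece.foldl
              (fun c x => PySem.List.pySetD c x (PySem.List.pyGetD c x 0 + 1)) c)
            (cp.foldl (fun c piece => piece.foldl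
              (fun c x => PySem.List.pySetD c x (PySem.List.pyGetD c x 0 + 1)) c)
              (List.replicate 7 (0 : Int))))
          (PySem.List.pyGetD p 0 0) 0
        + PySem.List.pyGetD
          (ds.foldl (fun c piece => piece.foldl
              (fun c x => PySem.List.pySetD c x (PySem.List.pyGetD c x 0 + 1)) c)
            (cp.foldl (fun c piece => piece.foldl
              (fun c x => PySem.List.pySetD c x (PySem.List.pyGetD c x 0 + 1)) c)
              (List.replicate 7 (0 : Int))))
          (PySem.List.pyGetD p 1 0) 0) := by
    intro p hp
    have hp' : p ∈ cp ++ ds := by simp [hp]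
    rw [hA, hA, hB _ (harg p hp' 0), hB _ (harg p hp' 1)]
  obtain ⟨hfold, hnodup⟩ := pv_master cp (PySem.List.pyGetD st 0 0) (PySem.List.pyGetD st 1 0)
    _ _ hsc cp [] PySem.Dict.empty (0, none) (by simp) rfl
    (by exact List.nodup_nil) (by intro k hk; exact absurd hk (by simp [PySem.Dict.empty, PySem.Dict.keys]))
    (by intro q hq; exact absurd hq (by simp))
  rw [show ((([] : List (List Int)).length : Int)) = 0 from rfl] at hfold
  rw [pv_answer_eq _ hnodup]
  exact (congrArg Prod.fst hfold).symm
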